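-- pv_equiv track=rewrite | github.com/talvola/generic_poker | tools/compare_two_card_high_high.py | extract_card_values
-- ===== SOURCE A (Python) =====
-- def extract_card_values(cards):
--     """Extract card values from a list of cards."""
--     value_map = {'2': 2, '3': 3, '4': 4, '5': 5, '6': 6, '7': 7,
--                  '8': 8, '9': 9, 'T': 10, 'J': 11, 'Q': 12, 'K': 13, 'A': 14}
--
--     # Extract the value (first character) of each card and convert to numeric
--     values = []
--     for card in cards:
--         if card and len(card) >= 2:
--             value = card[0]
--             if value in value_map:
--                 values.append(value_map[value])
--
--     # Sort in descending order
--     values.sort(reverse=True)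
--     return values
-- ===== SOURCE B (Python) =====
-- def extract_card_values(cards):
--     """Extract card values from a list of cards (counting sort, no comparison sort)."""
--     value_map = {'2': 2, '3': 3, '4': 4, '5': 5, '6': 6, '7': 7,
--                  '8': 8, '9': 9, 'T': 10, 'J': 11, 'Q': 12, 'K': 13, 'A': 14}
--     counts = {}
--     for card in cards:
--         if card and len(card) >= 2:
--             v = value_map.get(card[0])
--             if v is not None:
--                 counts[v] = counts.get(v, 0) + 1
--     out = []
--     for v in range(14, 1, -1):
--         out.extend([v] * counts.get(v, 0))
--     return out
-- ===== Notes on version B (the rewrite author's own statement) =====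
-- stated objective: alternative
-- what changed: Replaces append-then-comparison-sort with a one-pass count table over the 13 ranks, emitting the descending result by walking ranks 14..2 (counting sort).
import Mathlib
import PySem

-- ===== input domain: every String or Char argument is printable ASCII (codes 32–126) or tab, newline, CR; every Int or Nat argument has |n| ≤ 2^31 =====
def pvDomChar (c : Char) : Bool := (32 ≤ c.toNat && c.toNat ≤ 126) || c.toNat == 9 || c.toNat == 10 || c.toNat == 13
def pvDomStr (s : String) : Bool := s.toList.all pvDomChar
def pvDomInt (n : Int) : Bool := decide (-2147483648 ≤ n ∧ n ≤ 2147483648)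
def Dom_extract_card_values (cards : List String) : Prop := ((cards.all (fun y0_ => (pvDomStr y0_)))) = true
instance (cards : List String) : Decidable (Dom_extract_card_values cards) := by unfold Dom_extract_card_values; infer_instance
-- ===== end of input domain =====

-- B replaces A's append-then-sort(reverse=True) by a count table over the 13 ranks emitted from 14 down to 2 (counting sort); same results, alternative algorithm.


-- the shared literal table value_map (both Pythons define the identical dict literal)
def pvValueMap : PySem.Dict Char Int :=
  PySem.Dict.ofList [('2', 2), ('3', 3), ('4', 4), ('5', 5), ('6', 6), ('7', 7),
                     ('8', 8), ('9', 9), ('T', 10), ('J', 11), ('Q', 12), ('K', 13), ('A', 14)]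

-- ===== PORT A =====
def extract_card_values (cards : List String) : List Int :=
  let values := cards.foldl (fun values card =>
    if card.toList ≠ [] ∧ 2 ≤ PySem.Str.len card then
      match PySem.Str.pyGet? card 0 with
      | some value =>
          if pvValueMap.contains value then values ++ [pvValueMap.getD value 0] else values
      | none => values
    else values) []
  PySem.List.sorted values (fun x => x) true

-- ===== PORT B =====
def extract_card_values_alt (cards : List String) : List Int :=
  let counts := cards.foldl (fun counts card =>
    if card.toList ≠ [] ∧ 2 ≤ PySem.Str.len card then
      match PySem.Str.pyGet? card 0 with
      | some c =>
          match pvValueMap.get? c with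
          | some v => counts.modify v 0 (· + 1)
          | none => counts
      | none => counts
    else counts) (PySem.Dict.empty : PySem.Dict Int Int)
  (PySem.List.pyRange 14 1 (-1)).foldl
    (fun out v => out ++ List.replicate (counts.getD v 0).toNat v) []

-- ===== PRECONDITION & SPEC =====
def Spec_extract_card_values (cards : List String) (out : List Int) : Prop := out = extract_card_values_alt cards
instance (cards : List String) (out : List Int) : Decidable (Spec_extract_card_values cards out) := by unfold Spec_extract_card_values; infer_instance

-- ===== CLAIM (what is proved, stated in full; the proofs are below) =====
def Claim_equal_extract_card_values : Prop := ∀ (cards : List String), Dom_extract_card_values cards → Spec_extract_card_values cards (extract_card_values cards)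

-- ===== LEMMAS AND PROOFS =====

-- the value a card contributes (if any): both loops accept exactly these cards
def pvValOf (card : String) : Option Int :=
  if 2 ≤ card.toList.length then pvValueMap.get? (card.toList.headD ' ') else none

theorem pvA_values (cards : List String) (acc : List Int) :
    cards.foldl (fun values card =>
      if card.toList ≠ [] ∧ 2 ≤ PySem.Str.len card then
        match PySem.Str.pyGet? card 0 with
        | some value =>
            if pvValueMap.contains value then values ++ [pvValueMap.getD value 0] else values
        | none => values
      else values) acc = acc ++ cards.filterMap pvValOf := by
  induction cards generalizing acc with
  | nil => simp
  | cons card cards ih =>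
    simp only [List.foldl_cons, List.filterMap_cons]
    rw [ih]
    have hstep : (if card.toList ≠ [] ∧ 2 ≤ PySem.Str.len card then
        match PySem.Str.pyGet? card 0 with
        | some value =>
            if pvValueMap.contains value then acc ++ [pvValueMap.getD value 0] else acc
        | none => acc
      else acc) = acc ++ (pvValOf card).toList := by
      rcases h : card.toList with _ | ⟨c, cs⟩
      · simp [pvValOf, h, PySem.Str.len_eq]
      · by_cases hl : 2 ≤ card.toList.length
        · have hlen : (card.toList ≠ [] ∧ 2 ≤ PySem.Str.len card) := by
            constructor
            · simp [h]
            · rw [PySem.Str.len_eq]; exact_mod_cast hl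
          rw [if_pos (show c :: cs ≠ [] ∧ 2 ≤ PySem.Str.len card from hlen.imp_left (fun _ => List.cons_ne_nil c cs))]
          have hget : PySem.Str.pyGet? card 0 = some c := by
            simp [PySem.Str.pyGet?, PySem.Chars.pyGet?, PySem.List.pyGet?, PySem.List.pyIdx?, h]
          rw [hget]
          unfold pvValOf
          rw [if_pos hl, h]
          simp only [List.headD_cons]
          rw [PySem.Dict.contains_eq_isSome_get?]
          cases hv : pvValueMap.get? c with
          | none => simp [hv]
          | some v => simp [hv, PySem.Dict.getD_eq_get?_getD]
        · have hneg : ¬ (card.toList ≠ [] ∧ 2 ≤ PySem.Str.len card) := by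
            rintro ⟨-, h2⟩
            rw [PySem.Str.len_eq] at h2
            exact hl (by exact_mod_cast h2)
          rw [if_neg (show ¬(c :: cs ≠ [] ∧ 2 ≤ PySem.Str.len card) from fun hh => hneg ⟨by simp [h], hh.2⟩)]
          unfold pvValOf
          rw [if_neg hl]
          simp
      
    rw [hstep]
    cases hv : pvValOf card <;> simp [hv]

theorem pvB_counts (cards : List String) (d : PySem.Dict Int Int) :
    cards.foldl (fun counts card =>
      if card.toList ≠ [] ∧ 2 ≤ PySem.Str.len card then
        match PySem.Str.pyGet? card 0 with
        | some c =>
            match pvValueMap.get? c with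
            | some v => counts.modify v 0 (· + 1)
            | none => counts
        | none => counts
      else counts) d = (cards.filterMap pvValOf).foldl (fun d v => d.modify v 0 (· + 1)) d := by
  induction cards generalizing d with
  | nil => simp
  | cons card cards ih =>
    simp only [List.foldl_cons, List.filterMap_cons]
    have hstep : (if card.toList ≠ [] ∧ 2 ≤ PySem.Str.len card then
        match PySem.Str.pyGet? card 0 with
        | some c =>
            match pvValueMap.get? c with
            | some v => d.modify v 0 (· + 1)
            | none => d
        | none => d
      else d) = (pvValOf card).elim d (fun v => d.modify v 0 (· + 1)) := by
      rcases h : card.toList with _ | ⟨c, cs⟩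
      · simp [pvValOf, h, PySem.Str.len_eq]
      · by_cases hl : 2 ≤ card.toList.length
        · have hlen : (card.toList ≠ [] ∧ 2 ≤ PySem.Str.len card) := by
            constructor
            · simp [h]
            · rw [PySem.Str.len_eq]; exact_mod_cast hl
          rw [if_pos (show c :: cs ≠ [] ∧ 2 ≤ PySem.Str.len card from hlen.imp_left (fun _ => List.cons_ne_nil c cs))]
          have hget : PySem.Str.pyGet? card 0 = some c := by
            simp [PySem.Str.pyGet?, PySem.Chars.pyGet?, PySem.List.pyGet?, PySem.List.pyIdx?, h]
          rw [hget]
          unfold pvValOf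
          rw [if_pos hl, h]
          simp only [List.headD_cons]
          cases hv : pvValueMap.get? c <;> simp [hv]
        · have hneg : ¬ (card.toList ≠ [] ∧ 2 ≤ PySem.Str.len card) := by
            rintro ⟨-, h2⟩
            rw [PySem.Str.len_eq] at h2
            exact hl (by exact_mod_cast h2)
          rw [if_neg (show ¬(c :: cs ≠ [] ∧ 2 ≤ PySem.Str.len card) from fun hh => hneg ⟨by simp [h], hh.2⟩)]
          unfold pvValOf
          rw [if_neg hl]
          simp
    rw [ih]
    rw [hstep]
    cases hv : pvValOf card <;> simp only [hv, Option.elim, List.foldl_cons]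

theorem pvVal_bounds (cards : List String) (x : Int) (hx : x ∈ cards.filterMap pvValOf) :
    2 ≤ x ∧ x ≤ 14 := by
  rw [List.mem_filterMap] at hx
  obtain ⟨card, -, hv⟩ := hx
  unfold pvValOf at hv
  split at hv
  · have hitems := PySem.Dict.mem_items_of_get?_eq_some _ hv
    have : pvValueMap.items = [('2', 2), ('3', 3), ('4', 4), ('5', 5), ('6', 6), ('7', 7),
        ('8', 8), ('9', 9), ('T', 10), ('J', 11), ('Q', 12), ('K', 13), ('A', 14)] := by decide
    rw [this] at hitems
    simp only [List.mem_cons, List.not_mem_nil, or_false, Prod.mk.injEq] at hitems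
    rcases hitems with ⟨-, h⟩|⟨-, h⟩|⟨-, h⟩|⟨-, h⟩|⟨-, h⟩|⟨-, h⟩|⟨-, h⟩|⟨-, h⟩|⟨-, h⟩|⟨-, h⟩|⟨-, h⟩|⟨-, h⟩|⟨-, h⟩ <;> omega
  · exact absurd hv (by simp)

theorem pvRep_pairwise (k : Int) (n : Nat) (l : List Int)
    (hl : l.Pairwise (fun a b => b ≤ a)) (hb : ∀ x ∈ l, x ≤ k) :
    (List.replicate n k ++ l).Pairwise (fun a b : Int => b ≤ a) := by
  apply List.pairwise_append.mpr
  refine ⟨List.pairwise_replicate.mpr (Or.inr le_rfl), hl, ?_⟩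
  intro a ha b hb'
  rw [List.eq_of_mem_replicate ha]
  exact hb b hb'

theorem pvEmit_eq_sorted (vs : List Int) (hb : ∀ x ∈ vs, 2 ≤ x ∧ x ≤ 14) :
    (PySem.List.pyRange 14 1 (-1)).foldl
      (fun out v => out ++ List.replicate (vs.count v) v) []
    = PySem.List.sorted vs (fun x => x) true := by
  have hR : PySem.List.pyRange 14 1 (-1) = [14, 13, 12, 11, 10, 9, 8, 7, 6, 5, 4, 3, 2] := by decide
  rw [hR]
  simp only [List.foldl_cons, List.foldl_nil, List.nil_append, List.append_assoc]
  have hperm : vs.Perm (List.replicate (vs.count 14) (14 : Int) ++ (List.replicate (vs.count 13) (13 : Int) ++ (List.replicate (vs.count 12) (12 : Int) ++ (List.replicate (vs.count 11) (11 : Int) ++ (List.replicate (vs.count 10) (10 : Int) ++ (List.replicate (vs.count 9) (9 : Int) ++ (List.replicate (vs.count 8) (8 : Int) ++ (List.replicate (vs.count 7) (7 : Int) ++ (List.replicate (vs.count 6) (6 : Int) ++ (List.replicate (vs.count 5) (5 : Int) ++ (List.replicate (vs.count 4) (4 : Int) ++ (List.replicate (vs.count 3) (3 : Int) ++ List.replicate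 (vs.count 2) (2 : Int))))))))))))) := by
    rw [List.perm_iff_count]
    intro w
    simp only [List.count_append, List.count_replicate]
    by_cases hw : 2 ≤ w ∧ w ≤ 14
    · obtain ⟨h1, h2⟩ := hw
      interval_cases w <;> simp
    · have hzero : vs.count w = 0 := by
        rw [List.count_eq_zero]
        intro hmem
        exact hw (hb w hmem)
      have e : ∀ k : Int, (if (k == w) = true then List.count k vs else 0) = 0 := by
        intro k
        split_ifs with hkw
        · rw [show k = w from by simpa using hkw]; exact hzero
        · rfl
      rw [hzero, e 14, e 13, e 12, e 11, e 10, e 9, e 8, e 7, e 6, e 5, e 4, e 3, e 2]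
  have hdesc : (List.replicate (vs.count 14) (14 : Int) ++ (List.replicate (vs.count 13) (13 : Int) ++ (List.replicate (vs.count 12) (12 : Int) ++ (List.replicate (vs.count 11) (11 : Int) ++ (List.replicate (vs.count 10) (10 : Int) ++ (List.replicate (vs.count 9) (9 : Int) ++ (List.replicate (vs.count 8) (8 : Int) ++ (List.replicate (vs.count 7) (7 : Int) ++ (List.replicate (vs.count 6) (6 : Int) ++ (List.replicate (vs.count 5) (5 : Int) ++ (List.replicate (vs.count 4) (4 : Int) ++ (List.replicate (vs.count 3) (3 : Int) ++ List.replicate (vs.count 2) (2 : Int))))))))))))).Pairwise (fun a b : Int => b ≤ a) := by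
    refine pvRep_pairwise _ _ _ (pvRep_pairwise _ _ _ (pvRep_pairwise _ _ _ (pvRep_pairwise _ _ _ (pvRep_pairwise _ _ _ (pvRep_pairwise _ _ _ (pvRep_pairwise _ _ _ (pvRep_pairwise _ _ _ (pvRep_pairwise _ _ _ (pvRep_pairwise _ _ _ (pvRep_pairwise _ _ _ (pvRep_pairwise _ _ _ (show (List.replicate (vs.count 2) (2 : Int)).Pairwise (fun a b : Int => b ≤ a) from List.pairwise_replicate.mpr (Or.inr le_rfl)) ?_) ?_) ?_) ?_) ?_) ?_) ?_) ?_) ?_) ?_) ?_) ?_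
    all_goals
      intro x hx
      simp only [List.mem_append, List.mem_replicate] at hx
      omega
  exact (PySem.List.eq_of_perm_of_pairwise_le_of_injective (fun x : Int => -x)
    (fun a b h => neg_inj.mp h)
    ((PySem.List.sorted_perm vs (fun x => x) true).trans hperm)
    ((PySem.List.sorted_pairwise_rev vs (fun x => x)).imp (fun h => neg_le_neg h))
    (hdesc.imp (fun h => neg_le_neg h))).symm

-- ===== VERDICT (by name: the statement is the Claim_ definition above) =====
theorem extract_card_values_spec : Claim_equal_extract_card_values := by
  intro cards _
  unfold Spec_extract_card_values extract_card_values extract_card_values_alt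
  rw [pvA_values, pvB_counts]
  simp only [List.nil_append, PySem.Dict.getD_foldl_modify_add_one, PySem.Dict.getD_empty,
    zero_add, Int.toNat_natCast]
  exact (pvEmit_eq_sorted (cards.filterMap pvValOf) (pvVal_bounds cards)).symm
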